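-- pv_equiv track=rewrite | github.com/pypi-data/pypi-mirror-380 | packages/case-boss/case_boss-0.1.0-py3-none-any.whl/case_boss/utils.py | convert_key_with_separator
-- ===== SOURCE A (Python) =====
-- from typing import Literal
--
-- def split_to_words(key: str) -> list[str]:
--     """
--     Splits a key into words, handling separators (_,-,space), camel/Pascal humps, and acronyms.
--     Returns words with their original casing preserved.
--     """
--     words: list[str] = []
--     current = ""
--     for char in key:
--         if char in "_- ":
--             if current:
--                 words.append(current)
--             current = ""
--             continue
--         if not current:
--             current = char
--             continue
--         prev = current[-1]
--         if prev.islower() and char.isupper():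
--             words.append(current)
--             current = char
--         elif prev.isupper() and char.islower() and len(current) > 1:
--             words.append(current[:-1])
--             current = current[-1] + char
--         else:
--             current += char
--     if current:
--         words.append(current)
--     return words
--
-- def convert_key_with_separator(
--     key: str,
--     preserve_tokens: set[str] | None = None,
--     separator: Literal["-", "_", " "] = "_",
-- ) -> str:
--
--     if preserve_tokens is None:
--         preserve_tokens = set()
--
--     words = split_to_words(key=key)
--     words_result: list[str] = []
--     for word in words:
--         preserve = False
--         if preserve_tokens:
--             acronym = word.upper()
--             preserve = acronym in preserve_tokens
--         w = acronym if preserve else word.lower()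
--         words_result.append(w)
--     return separator.join(words_result)
-- ===== SOURCE B (Python) =====
-- def convert_key_with_separator(key, preserve_tokens=None, separator="_"):
--     pt = preserve_tokens if preserve_tokens is not None else set()
--     seps = "_- "
--     chars = list(key)
--     prevs = [None] + chars[:-1]
--     nexts = chars[1:] + [None]
--     words = []  # each word kept as a list of characters
--     for prev, ch, nxt in zip(prevs, chars, nexts):
--         if ch in seps:
--             continue
--         starts_word = (
--             prev is None
--             or prev in seps
--             or (prev.islower() and ch.isupper())
--             or (ch.isupper() and not prev.islower()
--                 and nxt is not None and nxt.islower())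
--         )
--         if starts_word:
--             words.append([ch])
--         else:
--             words[-1].append(ch)
--     out = ["".join(cs) for cs in words]
--     return separator.join(w.upper() if w.upper() in pt else w.lower() for w in out)
-- ===== Notes on version B (the rewrite author's own statement) =====
-- stated objective: alternative
-- what changed: A decides word splits from a stateful accumulator of the word being built (its length and last character); B decides each boundary from a purely local three-character window (previous char, char, next char) obtained by zipping the string with its shifted copies, grouping characters into words accordingly, then recasing and joining.
import Mathlib
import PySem

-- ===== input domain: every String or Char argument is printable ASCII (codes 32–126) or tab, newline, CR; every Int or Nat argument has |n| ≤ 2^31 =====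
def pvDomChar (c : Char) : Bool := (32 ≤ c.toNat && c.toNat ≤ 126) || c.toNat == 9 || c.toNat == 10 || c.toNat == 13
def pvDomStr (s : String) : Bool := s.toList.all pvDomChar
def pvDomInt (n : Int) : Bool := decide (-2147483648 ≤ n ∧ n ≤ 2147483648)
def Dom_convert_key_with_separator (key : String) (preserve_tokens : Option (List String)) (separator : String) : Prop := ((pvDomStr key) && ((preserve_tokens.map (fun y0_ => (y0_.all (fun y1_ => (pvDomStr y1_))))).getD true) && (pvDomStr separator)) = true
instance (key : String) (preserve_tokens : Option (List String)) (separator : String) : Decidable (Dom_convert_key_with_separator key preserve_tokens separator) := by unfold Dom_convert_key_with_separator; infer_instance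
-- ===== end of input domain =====

-- B re-implements the word split with a stateless three-character window (prev, char, next)
-- instead of A's stateful `current` accumulator; same return value, similar cost ("alternative").

-- ===== PORT A =====

-- `char in "_- "`
def pvSepA (c : Char) : Bool := c == '_' || c == '-' || c == ' '

-- the loop of split_to_words: state (words, current); current[-1] read with getLastD
-- (only reached when current is nonempty, as in the Python)
def pvAGo (cs : List Char) (words : List (List Char)) (current : List Char) : List (List Char) :=
  match cs with
  | [] => if current.isEmpty then words else words ++ [current]
  | c :: rest =>
    if pvSepA c then
      pvAGo rest (if current.isEmpty then words else words ++ [current]) []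
    else if current.isEmpty then
      pvAGo rest words [c]
    else
      let prev := current.getLastD ' '
      if PySem.Chars.islower prev && PySem.Chars.isupper c then
        pvAGo rest (words ++ [current]) [c]
      else if PySem.Chars.isupper prev && PySem.Chars.islower c && decide (current.length > 1) then
        pvAGo rest (words ++ [current.dropLast]) [prev, c]
      else
        pvAGo rest words (current ++ [c])

def convert_key_with_separator (key : String) (preserve_tokens : Option (List String)) (separator : String) : String :=
  let pts : List (List Char) := (preserve_tokens.getD []).map String.toList  -- None -> set()
  let words := pvAGo key.toList [] []
  let words_result := words.foldl (fun acc word =>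
    let preserve := if pts.isEmpty then false else pts.contains (PySem.Chars.upper word)
    acc ++ [if preserve then PySem.Chars.upper word else PySem.Chars.lower word]) []
  String.ofList (PySem.Chars.join separator.toList words_result)

-- ===== PORT B =====

-- `ch in "_- "`
def pvSepB (c : Char) : Bool := c == '_' || c == '-' || c == ' '

-- B's local boundary test on the window (prev, ch, nxt)
def pvStartsWord (prev : Option Char) (ch : Char) (nxt : Option Char) : Bool :=
  match prev with
  | none => true
  | some p =>
    pvSepB p || (PySem.Chars.islower p && PySem.Chars.isupper ch) ||
      (PySem.Chars.isupper ch && !PySem.Chars.islower p &&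
        (match nxt with | some x => PySem.Chars.islower x | none => false))

def convert_key_with_separator_alt (key : String) (preserve_tokens : Option (List String)) (separator : String) : String :=
  let pts : List (List Char) := (preserve_tokens.getD []).map String.toList
  let chars := key.toList
  let prevs : List (Option Char) := none :: chars.dropLast.map some   -- [None] + chars[:-1]
  let nexts : List (Option Char) := chars.tail.map some ++ [none]     -- chars[1:] + [None]
  let words := (prevs.zip (chars.zip nexts)).foldl (fun ws t =>
    if pvSepB t.2.1 then ws
    else if pvStartsWord t.1 t.2.1 t.2.2 then ws ++ [[t.2.1]]
    else ws.dropLast ++ [ws.getLastD [] ++ [t.2.1]]) []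
  let out := words.map (fun w =>
    if pts.contains (PySem.Chars.upper w) then PySem.Chars.upper w else PySem.Chars.lower w)
  String.ofList (PySem.Chars.join separator.toList out)

-- ===== PRECONDITION & SPEC =====
def Spec_convert_key_with_separator (key : String) (preserve_tokens : Option (List String)) (separator : String) (out : String) : Prop := out = convert_key_with_separator_alt key preserve_tokens separator
instance (key : String) (preserve_tokens : Option (List String)) (separator : String) (out : String) : Decidable (Spec_convert_key_with_separator key preserve_tokens separator out) := by unfold Spec_convert_key_with_separator; infer_instance

-- ===== CLAIM (what is proved, stated in full; the proofs are below) =====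
def Claim_equal_convert_key_with_separator : Prop := ∀ (key : String) (preserve_tokens : Option (List String)) (separator : String), Dom_convert_key_with_separator key preserve_tokens separator → Spec_convert_key_with_separator key preserve_tokens separator (convert_key_with_separator key preserve_tokens separator)

-- ===== LEMMAS AND PROOFS =====

def pvBGo (p : Option Char) (cs : List Char) (ws : List (List Char)) : List (List Char) :=
  match cs with
  | [] => ws
  | c :: rest =>
    if pvSepB c then pvBGo (some c) rest ws
    else if pvStartsWord p c rest.head? then pvBGo (some c) rest (ws ++ [[c]])
    else pvBGo (some c) rest (ws.dropLast ++ [ws.getLastD [] ++ [c]])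
lemma pvBGo_eq_fold : ∀ (cs : List Char) (p : Option Char) (ws : List (List Char)),
    (((p :: cs.dropLast.map some).zip (cs.zip (cs.tail.map some ++ [none]))).foldl (fun ws t =>
      if pvSepB t.2.1 then ws
      else if pvStartsWord t.1 t.2.1 t.2.2 then ws ++ [[t.2.1]]
      else ws.dropLast ++ [ws.getLastD [] ++ [t.2.1]]) ws) = pvBGo p cs ws := by
  intro cs
  induction cs with
  | nil => intro p ws; simp [pvBGo]
  | cons c rest ih =>
    intro p ws
    cases rest with
    | nil => simp [pvBGo]
    | cons r rs =>
      simp only [List.dropLast, List.map, List.tail, List.cons_append, List.zip_cons_cons,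
        List.foldl_cons]
      simp only [List.tail_cons] at ih
      rw [ih]
      by_cases h1 : pvSepB c = true <;> by_cases h2 : pvStartsWord p c (some r) = true <;>
        simp [pvBGo, h1, h2]

lemma pv_up_not_low {c : Char} (h : PySem.Chars.isupper c = true) : PySem.Chars.islower c = false := by
  simp [PySem.Chars.isupper, PySem.Chars.islower, Char.le_def, UInt32.le_iff_toNat_le] at *; omega

lemma pv_low_not_up {c : Char} (h : PySem.Chars.islower c = true) : PySem.Chars.isupper c = false := by
  simp [PySem.Chars.isupper, PySem.Chars.islower, Char.le_def, UInt32.le_iff_toNat_le] at *; omega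

lemma pv_sep_not_low {c : Char} (h : pvSepB c = true) : PySem.Chars.islower c = false := by
  simp only [pvSepB, Bool.or_eq_true, beq_iff_eq] at h
  rcases h with (h | h) | h <;> subst h <;> decide

def pvPeek (cs : List Char) : Bool :=
  match cs with
  | c :: _ => PySem.Chars.islower c
  | [] => false

def pvBW (ws : List (List Char)) (current : List Char) (pk : Bool) : List (List Char) :=
  if current.isEmpty then ws
  else if PySem.Chars.isupper (current.getLastD ' ') && decide (current.length > 1) && pk then
    ws ++ [current.dropLast, [current.getLastD ' ']]
  else ws ++ [current]

lemma pv_main : ∀ (cs : List Char) (p : Option Char) (ws : List (List Char)) (current : List Char),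
    (current = [] ↔ (p = none ∨ ∃ pc, p = some pc ∧ pvSepB pc = true)) →
    (∀ pc, p = some pc → pvSepB pc = false → current.getLast? = some pc) →
    pvBGo p cs (pvBW ws current (pvPeek cs)) = pvAGo cs ws current := by
  intro cs
  induction cs with
  | nil =>
    intro p ws current h1 h2
    simp [pvBGo, pvAGo, pvBW, pvPeek]
  | cons c rest ih =>
    intro p ws current h1 h2
    by_cases hsep : pvSepB c = true
    · -- separator: A flushes current, B skips the char
      have hsepA : pvSepA c = true := hsep
      have hlow : PySem.Chars.islower c = false := pv_sep_not_low hsep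
      have hbw : pvBW ws current (pvPeek (c :: rest)) =
          (if current.isEmpty then ws else ws ++ [current]) := by
        simp [pvBW, pvPeek, hlow]
      have hih := ih (some c) (if current.isEmpty then ws else ws ++ [current]) []
        (by simp [hsep])
        (by intro pc hpc hf; injection hpc with h; rw [h] at hsep; exact absurd hsep (by simp [hf]))
      simp only [pvBW, List.isEmpty_nil, if_true] at hih
      simp only [pvAGo, pvBGo, hsepA, hsep, if_true, hbw, hih]
    · have hsep' : pvSepB c = false := by simpa using hsep
      have hsepA : pvSepA c = false := hsep'
      cases current with
      | nil =>
        -- fresh word in both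
        have hsw : pvStartsWord p c rest.head? = true := by
          rcases h1.mp rfl with hp | ⟨pc, hp, hpsep⟩
          · subst hp; simp [pvStartsWord]
          · subst hp; simp [pvStartsWord, hpsep]
        have hih := ih (some c) ws [c]
          (by simp [hsep']) (by intro pc hpc _; injection hpc with h; simp [h])
        have hbw : pvBW ws [c] (pvPeek rest) = ws ++ [[c]] := by simp [pvBW]
        rw [hbw] at hih
        simp only [pvAGo, pvBGo, pvBW, hsepA, hsep', List.isEmpty_nil, if_true,
          Bool.false_eq_true, if_false, hsw, hih]
      | cons a as =>
        -- current nonempty: last char is pc = the previous character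
        obtain ⟨pc, hp, hpcsep⟩ : ∃ pc, p = some pc ∧ pvSepB pc = false := by
          cases p with
          | none => exact absurd (h1.mpr (Or.inl rfl)) (by simp)
          | some pc =>
            refine ⟨pc, rfl, ?_⟩
            by_contra hx
            exact absurd (h1.mpr (Or.inr ⟨pc, rfl, by simpa using hx⟩)) (by simp)
        subst hp
        have hlast : (a :: as).getLast? = some pc := h2 pc rfl hpcsep
        have hlastD : (a :: as).getLastD ' ' = pc := by
          rw [List.getLastD_eq_getLast?, hlast]; rfl
        have hm : (match rest.head? with | some x => PySem.Chars.islower x | none => false) =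
            pvPeek rest := by cases rest <;> rfl
        by_cases hr1 : (PySem.Chars.islower pc && PySem.Chars.isupper c) = true
        · -- lower→upper hump: both start a fresh word
          obtain ⟨hlowpc, hupc⟩ := (by simpa using hr1 : _ ∧ _)
          have hlowc : PySem.Chars.islower c = false := pv_up_not_low hupc
          have hsw : pvStartsWord (some pc) c rest.head? = true := by
            simp [pvStartsWord, hlowpc, hupc]
          have hbw : pvBW ws (a :: as) (pvPeek (c :: rest)) = ws ++ [a :: as] := by
            simp [pvBW, pvPeek, hlowc]
          have hih := ih (some c) (ws ++ [a :: as]) [c]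
            (by simp [hsep']) (by intro pc' hpc' _; injection hpc' with h; simp [h])
          have hbw2 : pvBW (ws ++ [a :: as]) [c] (pvPeek rest) = (ws ++ [a :: as]) ++ [[c]] := by
            simp [pvBW]
          rw [hbw2] at hih
          simp only [pvAGo, pvBGo, hsepA, hsep', Bool.false_eq_true, if_false,
            List.isEmpty_cons, hlastD, hr1, if_true, hsw, hbw, hih]
        · by_cases hr2 : (PySem.Chars.isupper pc && PySem.Chars.islower c &&
              decide ((a :: as).length > 1)) = true
          · -- acronym cut: B already split the last uppercase letter off
            obtain ⟨h12, hlen⟩ := (by simpa using hr2 : _ ∧ _)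
            obtain ⟨huppc, hlowc⟩ := (by simpa using h12 : _ ∧ _)
            have hupc : PySem.Chars.isupper c = false := pv_low_not_up hlowc
            have hlowpc : PySem.Chars.islower pc = false := pv_up_not_low huppc
            have hsw : pvStartsWord (some pc) c rest.head? = false := by
              simp [pvStartsWord, hpcsep, hlowpc, hupc]
            have hbw : pvBW ws (a :: as) (pvPeek (c :: rest)) =
                (ws ++ [(a :: as).dropLast]) ++ [[pc]] := by
              simp [pvBW, pvPeek, hlowc, hlast, huppc, hlen]
            have hih := ih (some c) (ws ++ [(a :: as).dropLast]) [pc, c]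
              (by simp [hsep']) (by intro pc' hpc' _; injection hpc' with h; simp [h])
            have hbw2 : pvBW (ws ++ [(a :: as).dropLast]) [pc, c] (pvPeek rest) =
                (ws ++ [(a :: as).dropLast]) ++ [[pc, c]] := by
              simp [pvBW, hupc]
            rw [hbw2] at hih
            rw [hbw]
            simp only [pvAGo, pvBGo, hsepA, hsep', Bool.false_eq_true, if_false,
              List.isEmpty_cons, hlastD, hr1, hr2, if_true, hsw,
              List.dropLast_concat, List.getLastD_concat, List.cons_append,
              List.nil_append]
            simpa using hih
          · -- no A-side cut: A extends current; B either already cut (lookahead) or extends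
            have hne : (a :: as) ++ [c] ≠ [] := by simp
            have hih := ih (some c) ws ((a :: as) ++ [c])
              (by simp [hsep']) (by intro pc' hpc' _; injection hpc' with h; subst h;
                                    exact List.getLast?_concat)
            by_cases hd4 : (PySem.Chars.isupper c && !PySem.Chars.islower pc &&
                pvPeek rest) = true
            · obtain ⟨h12, hpk⟩ := (by simpa using hd4 : _ ∧ _)
              obtain ⟨hupc, hnlowpc⟩ := (by simpa using h12 : _ ∧ _)
              have hlowc : PySem.Chars.islower c = false := pv_up_not_low hupc
              have hsw : pvStartsWord (some pc) c rest.head? = true := by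
                simp [pvStartsWord, hm, hupc, hnlowpc, hpk]
              have hbw : pvBW ws (a :: as) (pvPeek (c :: rest)) = ws ++ [a :: as] := by
                simp [pvBW, pvPeek, hlowc]
              have hbw2 : pvBW ws ((a :: as) ++ [c]) (pvPeek rest) =
                  (ws ++ [a :: as]) ++ [[c]] := by
                have hl : (a :: (as ++ [c])).length > 1 := by simp
                have hgl : (a :: (as ++ [c])).getLast? = some c :=
                  List.getLast?_concat (l := a :: as)
                have hdl : (a :: (as ++ [c])).dropLast = a :: as :=
                  List.dropLast_concat (l₁ := a :: as)
                simp [pvBW, hgl, hdl, hupc, hpk]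
              rw [hbw2] at hih
              simp only [pvAGo, pvBGo, hsepA, hsep', Bool.false_eq_true, if_false,
                List.isEmpty_cons, hlastD, hr1, hr2, hsw, if_true, hbw, hih]
            · have hsw : pvStartsWord (some pc) c rest.head? = false := by
                simp only [pvStartsWord, hm, hpcsep, Bool.false_or]
                revert hr1 hd4
                cases PySem.Chars.islower pc <;> cases PySem.Chars.isupper c <;>
                  cases pvPeek rest <;> simp
              have hbw : pvBW ws (a :: as) (pvPeek (c :: rest)) = ws ++ [a :: as] := by
                simp only [pvBW, List.isEmpty_cons, Bool.false_eq_true, if_false, hlastD,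
                  pvPeek]
                have : (PySem.Chars.isupper pc && decide ((a :: as).length > 1) &&
                    PySem.Chars.islower c) = false := by
                  revert hr2
                  cases PySem.Chars.isupper pc <;> cases PySem.Chars.islower c <;>
                    cases (decide ((a :: as).length > 1)) <;> simp
                rw [this]; simp
              have hbw2 : pvBW ws ((a :: as) ++ [c]) (pvPeek rest) =
                  ws ++ [(a :: as) ++ [c]] := by
                simp only [pvBW, List.getLastD_concat]
                have : (PySem.Chars.isupper c && decide (((a :: as) ++ [c]).length > 1) &&
                    pvPeek rest) = false := by
                  revert hr1 hd4
                  cases PySem.Chars.islower pc <;> cases PySem.Chars.isupper c <;>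
                    cases pvPeek rest <;> simp
                rw [this]; simp
              rw [hbw2] at hih
              simp only [pvAGo, pvBGo, hsepA, hsep', Bool.false_eq_true, if_false,
                List.isEmpty_cons, hlastD, hr1, hr2, hsw, hbw,
                List.dropLast_concat, List.getLastD_concat, hih]

lemma pv_split_eq (cs : List Char) : pvBGo none cs [] = pvAGo cs [] [] := by
  have h := pv_main cs none [] [] (by simp) (by intro pc h; cases h)
  simpa [pvBW] using h

lemma pv_recase (pts : List (List Char)) (ws : List (List Char)) :
    ws.foldl (fun acc word =>
      acc ++ [if (if pts.isEmpty then false else pts.contains (PySem.Chars.upper word)) then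
        PySem.Chars.upper word else PySem.Chars.lower word]) [] =
    ws.map (fun w => if pts.contains (PySem.Chars.upper w) then PySem.Chars.upper w
      else PySem.Chars.lower w) := by
  rw [PySem.List.foldl_append_singleton_eq_map]
  rcases pts with _ | ⟨q, qs⟩
  · simp
  · simp

-- ===== VERDICT (by name: the statement is the Claim_ definition above) =====
theorem convert_key_with_separator_spec : Claim_equal_convert_key_with_separator := by
  intro key preserve_tokens separator _
  unfold Spec_convert_key_with_separator convert_key_with_separator convert_key_with_separator_alt
  simp only [pvBGo_eq_fold, pv_split_eq, pv_recase]
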